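-- pv_equiv track=rewrite | github.com/MyCuteGuineaPig/Leetcode | Dynamic Programming/446. Arithmetic Slices II - Subsequence.py | numberOfArithmeticSlices
-- ===== SOURCE A (Python) =====
-- import collections
-- import collections
--
-- def numberOfArithmeticSlices(A):
--     """
--     :type A: List[int]
--     :rtype: int
--     """
--     dic, res = [collections.defaultdict(int) for _ in range(len(A))] , 0
--     for i in range(1, len(A)):
--         for j in range(i):
--             dic[i][A[i] - A[j]] += 1
--             if A[i] - A[j] in dic[j]:  # efficient
--                 res += dic[j][A[i] - A[j]]
--                 dic[i][A[i] - A[j]] += dic[j][A[i] - A[j]] # 是加上比如[2,2,3,4] 如果不是+， return是1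
--     return res
-- ===== SOURCE B (Python) =====
-- def numberOfArithmeticSlices(A):
--     n = len(A)
--     # index: value -> ascending list of positions
--     pos = {}
--     for idx, v in enumerate(A):
--         pos.setdefault(v, []).append(idx)
--     # W[(j, i)] = number of weak arithmetic subsequences whose last two
--     # elements are exactly at positions j < i.
--     W = {}
--     # S[(j, v)] = sum of W[(k, j)] over k < j with A[k] == v (memoised prefix sums)
--     S = {}
--     for i in range(1, n):
--         for j in range(i):
--             key = (j, 2 * A[j] - A[i])
--             if key not in S:
--                 t = 0
--                 for k in pos.get(key[1], ()):
--                     if k >= j: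
--                         break
--                     t += W[(k, j)]
--                 S[key] = t
--             W[(j, i)] = S[key] + 1
--     return sum(W.values()) - n * (n - 1) // 2
-- ===== Notes on version B (the rewrite author's own statement) =====
-- stated objective: alternative
-- what changed: B replaces A's per-index difference maps (dp[i][d] += dp[j][d]+1 with inline accumulation) by a pair-keyed DP: a value->positions index built once, W[(j,i)] = 1 + sum of W[(k,j)] over earlier k with A[k] == 2*A[j]-A[i] (the prefix sums memoised per (index,value) in S), returning sum(W.values()) - n*(n-1)//2.
import Mathlib
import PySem

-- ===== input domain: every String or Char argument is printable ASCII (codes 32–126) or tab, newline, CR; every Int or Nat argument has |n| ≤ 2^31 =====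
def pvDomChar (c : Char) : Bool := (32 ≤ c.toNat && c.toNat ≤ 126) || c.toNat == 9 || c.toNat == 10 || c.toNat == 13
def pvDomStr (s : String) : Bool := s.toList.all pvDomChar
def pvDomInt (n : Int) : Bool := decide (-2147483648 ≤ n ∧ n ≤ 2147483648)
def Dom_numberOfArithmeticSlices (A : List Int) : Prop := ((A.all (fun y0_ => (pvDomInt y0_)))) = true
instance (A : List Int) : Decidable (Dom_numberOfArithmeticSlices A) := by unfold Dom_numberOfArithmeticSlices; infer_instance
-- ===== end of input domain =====

-- B replaces A's per-index difference maps by a pair-keyed DP (W[(j,i)] = weak subsequences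
-- ending exactly at j,i) driven by a value→positions index with per-(index,value) memoised
-- prefix sums, subtracting n(n-1)/2 at the end; objective: alternative.

-- ===== PORT A =====
-- loop body of A's inner 'for j in range(i)'
def pvStepA (A : List Int) (i : Int) (st : List (PySem.Dict Int Int) × Int) (j : Int) :
    List (PySem.Dict Int Int) × Int :=
  let d := PySem.List.pyGetD A i 0 - PySem.List.pyGetD A j 0
  -- dic[i][A[i]-A[j]] += 1
  let dic := PySem.List.pySetD st.1 i
      ((PySem.List.pyGetD st.1 i PySem.Dict.empty).modify d 0 (· + 1))
  let tj := PySem.List.pyGetD dic j PySem.Dict.empty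
  if tj.contains d then
    -- res += dic[j][d];  dic[i][d] += dic[j][d]
    (PySem.List.pySetD dic i
        ((PySem.List.pyGetD dic i PySem.Dict.empty).modify d 0 (· + tj.getD d 0)),
     st.2 + tj.getD d 0)
  else
    (dic, st.2)

def numberOfArithmeticSlices (A : List Int) : Int :=
  let n : Int := A.length
  let st : List (PySem.Dict Int Int) × Int :=
    ((PySem.List.pyRange 0 n 1).map (fun _ => PySem.Dict.empty), 0)
  ((PySem.List.pyRange 1 n 1).foldl
      (fun st i => (PySem.List.pyRange 0 i 1).foldl (pvStepA A i) st) st).2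

-- ===== PORT B =====
-- 'for idx, v in enumerate(A): pos.setdefault(v, []).append(idx)'
def pvPosB (A : List Int) : PySem.Dict Int (List Int) :=
  (PySem.List.enumerate A 0).foldl
    (fun d p => d.modify p.2 [] (fun l => l ++ [p.1])) PySem.Dict.empty

-- loop body of B's inner 'for j in range(i)'; state = (W, S).
-- The k-loop 'for k in pos.get(v, ()): if k >= j: break; t += W[(k, j)]' is the fold over
-- takeWhile (k < j); W[(k, j)] is ported as getD 0, exact because the key is always present.
def pvStepB (A : List Int) (pos : PySem.Dict Int (List Int)) (ai i : Int)
    (st : PySem.Dict (Int × Int) Int × PySem.Dict (Int × Int) Int) (j : Int) :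
    PySem.Dict (Int × Int) Int × PySem.Dict (Int × Int) Int :=
  let v := 2 * PySem.List.pyGetD A j 0 - ai
  if st.2.contains (j, v) then
    (st.1.insert (j, i) (st.2.getD (j, v) 0 + 1), st.2)
  else
    let t := ((pos.getD v []).takeWhile (fun k => decide (k < j))).foldl
        (fun t k => t + st.1.getD (k, j) 0) 0
    (st.1.insert (j, i) (t + 1), st.2.insert (j, v) t)

def numberOfArithmeticSlices_alt (A : List Int) : Int :=
  let n : Int := A.length
  let pos := pvPosB A
  let st := (PySem.List.pyRange 1 n 1).foldl
      (fun st i => (PySem.List.pyRange 0 i 1).foldl (pvStepB A pos (PySem.List.pyGetD A i 0) i) st)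
      (PySem.Dict.empty, PySem.Dict.empty)
  st.1.values.sum - PySem.Int.floordiv (n * (n - 1)) 2

-- ===== PRECONDITION & SPEC =====
def Spec_numberOfArithmeticSlices (A : List Int) (out : Int) : Prop := out = numberOfArithmeticSlices_alt A
instance (A : List Int) (out : Int) : Decidable (Spec_numberOfArithmeticSlices A out) := by unfold Spec_numberOfArithmeticSlices; infer_instance

-- ===== CLAIM (what is proved, stated in full; the proofs are below) =====
def Claim_equal_numberOfArithmeticSlices : Prop := ∀ (A : List Int), Dom_numberOfArithmeticSlices A → Spec_numberOfArithmeticSlices A (numberOfArithmeticSlices A)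

-- ===== LEMMAS AND PROOFS =====

-- proof-side intermediate: the table of weak (length ≥ 2) counts dp[i][d], against which
-- both ports are measured
def pvStepW (A : List Int) (ai i : Int) (dp : List (PySem.Dict Int Int)) (j : Int) :
    List (PySem.Dict Int Int) :=
  let d := ai - PySem.List.pyGetD A j 0
  let ti := PySem.List.pyGetD dp i PySem.Dict.empty
  PySem.List.pySetD dp i
    (ti.insert d (ti.getD d 0 + (PySem.List.pyGetD dp j PySem.Dict.empty).getD d 0 + 1))

-- total value mass of a dp table
def pvVSum (l : List (PySem.Dict Int Int)) : Int := (l.map (fun t => t.values.sum)).sum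

-- every dict in the table has nodup keys
def pvGood (l : List (PySem.Dict Int Int)) : Prop := ∀ t ∈ l, t.keys.Nodup

def pvDp0 (A : List Int) : List (PySem.Dict Int Int) :=
  (PySem.List.pyRange 0 (A.length : Int) 1).map (fun _ => PySem.Dict.empty)

-- state after the first m outer iterations, weak side and B side
def pvWeakAt (A : List Int) (m : Int) : List (PySem.Dict Int Int) :=
  (PySem.List.pyRange 1 m 1).foldl
    (fun dp i => (PySem.List.pyRange 0 i 1).foldl (pvStepW A (PySem.List.pyGetD A i 0) i) dp)
    (pvDp0 A)

def pvAltAt (A : List Int) (m : Int) :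
    PySem.Dict (Int × Int) Int × PySem.Dict (Int × Int) Int :=
  (PySem.List.pyRange 1 m 1).foldl
    (fun st i => (PySem.List.pyRange 0 i 1).foldl (pvStepB A (pvPosB A) (PySem.List.pyGetD A i 0) i) st)
    (PySem.Dict.empty, PySem.Dict.empty)

-- state inside outer iteration m after the first j inner iterations
def pvWeakIn (A : List Int) (m j : Int) : List (PySem.Dict Int Int) :=
  (PySem.List.pyRange 0 j 1).foldl (pvStepW A (PySem.List.pyGetD A m 0) m) (pvWeakAt A m)

def pvAltIn (A : List Int) (m j : Int) :
    PySem.Dict (Int × Int) Int × PySem.Dict (Int × Int) Int :=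
  (PySem.List.pyRange 0 j 1).foldl (pvStepB A (pvPosB A) (PySem.List.pyGetD A m 0) m) (pvAltAt A m)

-- Σ_{k < j, A[k] = v} W[(k, m)]
def pvRowP (A : List Int) (W : PySem.Dict (Int × Int) Int) (j m v : Int) : Int :=
  (((PySem.List.pyRange 0 j 1).filter (fun k => PySem.List.pyGetD A k 0 == v)).map
    (fun k => W.getD (k, m) 0)).sum

def pvRowV (A : List Int) (W : PySem.Dict (Int × Int) Int) (j v : Int) : Int :=
  pvRowP A W j j v

-- outer invariant after m outer iterations
def pvInv (A : List Int) (m : Int) (dp : List (PySem.Dict Int Int))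
    (W S : PySem.Dict (Int × Int) Int) : Prop :=
  dp.length = A.length ∧ pvGood dp ∧
  (∀ p : Int × Int, W.contains p = true → 0 ≤ p.1 ∧ p.1 < p.2 ∧ p.2 < m) ∧
  (∀ j : Int, 0 ≤ j → j < (A.length : Int) →
    (m ≤ j → PySem.List.pyGetD dp j PySem.Dict.empty = PySem.Dict.empty) ∧
    (j < m → ∀ d : Int, (PySem.List.pyGetD dp j PySem.Dict.empty).getD d 0
        = pvRowV A W j (PySem.List.pyGetD A j 0 - d))) ∧
  (∀ q : Int × Int, S.contains q = true →
    0 ≤ q.1 ∧ q.1 < m ∧ S.getD q 0 = pvRowV A W q.1 q.2) ∧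
  pvVSum dp = W.values.sum

-- inner invariant during outer iteration m, after j inner iterations
def pvInvIn (A : List Int) (m j : Int) (dp : List (PySem.Dict Int Int))
    (W S : PySem.Dict (Int × Int) Int) : Prop :=
  dp.length = A.length ∧ pvGood dp ∧
  (∀ i0 : Int, 0 ≤ i0 → i0 < (A.length : Int) → i0 ≠ m →
    PySem.List.pyGetD dp i0 PySem.Dict.empty
      = PySem.List.pyGetD (pvWeakAt A m) i0 PySem.Dict.empty) ∧
  (∀ p : Int × Int, W.contains p = true →
    0 ≤ p.1 ∧ p.1 < p.2 ∧ (p.2 < m ∨ (p.2 = m ∧ p.1 < j))) ∧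
  (∀ p : Int × Int, p.2 ≠ m → W.getD p 0 = (pvAltAt A m).1.getD p 0) ∧
  (∀ q : Int × Int, S.contains q = true →
    0 ≤ q.1 ∧ q.1 < m ∧ S.getD q 0 = pvRowV A W q.1 q.2) ∧
  (∀ d : Int, (PySem.List.pyGetD dp m PySem.Dict.empty).getD d 0
      = pvRowP A W j m (PySem.List.pyGetD A m 0 - d)) ∧
  pvVSum dp = W.values.sum

theorem pv_pySetD_eq_set {α : Type} (xs : List α) (i : Int) (v : α)
    (h0 : 0 ≤ i) (h1 : i < (xs.length : Int)) :
    PySem.List.pySetD xs i v = xs.set i.toNat v := by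
  simp [PySem.List.pySetD, PySem.List.pySet?, PySem.List.pyIdx?, h0, h1]

theorem pv_sum_map_set {α : Type} (f : α → Int) :
    ∀ (l : List α) (n : Nat) (w : α) (h : n < l.length),
    ((l.set n w).map f).sum = (l.map f).sum - f l[n] + f w := by
  intro l
  induction l with
  | nil => intro n w h; simp at h
  | cons x t ih =>
    intro n w h
    cases n with
    | zero => simp; ring
    | succ m =>
      simp only [List.set_cons_succ, List.map_cons, List.sum_cons, List.getElem_cons_succ]
      rw [ih m w (by simpa using h)]; ring

theorem pv_aux_replace : ∀ (l : List (Int × Int)) (k v : Int),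
    (l.map Prod.fst).Nodup → l.any (fun p => p.1 == k) = true →
    ((l.map (fun p => if p.1 == k then (k, v) else p)).map Prod.snd).sum
      = (l.map Prod.snd).sum - ((l.find? (fun p => p.1 == k)).map Prod.snd).getD 0 + v := by
  intro l
  induction l with
  | nil => intro k v _ h; simp at h
  | cons p t ih =>
    intro k v hnd hany
    by_cases hp : p.1 = k
    · have hknot : k ∉ t.map Prod.fst := by
        rw [List.map_cons, List.nodup_cons] at hnd
        rw [← hp]; exact hnd.1
      have hrep : List.map (fun q : Int × Int => if q.1 == k then (k, v) else q) t
          = List.map id t := by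
        apply List.map_congr_left
        intro q hq
        have : q.1 ≠ k := fun he => hknot (he ▸ List.mem_map.mpr ⟨q, hq, rfl⟩)
        simp [this]
      simp only [List.map_cons, List.find?_cons, hp, beq_self_eq_true, if_true, hrep,
        List.map_id, List.sum_cons, Option.map_some, Option.getD_some]
      ring
    · have hpb : (p.1 == k) = false := by simp [hp]
      have hany' : t.any (fun q => q.1 == k) = true := by simpa [hpb] using hany
      have hnd' : (t.map Prod.fst).Nodup := by
        rw [List.map_cons, List.nodup_cons] at hnd; exact hnd.2
      simp only [List.map_cons, List.find?_cons, hpb, if_false, List.sum_cons,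
        Bool.false_eq_true, List.map_map]
      have := ih k v hnd' hany'
      simp only [List.map_map] at this
      rw [this]
      ring

theorem pv_values_sum_insert (t : PySem.Dict Int Int) (k v : Int) (h : t.keys.Nodup) :
    (t.insert k v).values.sum = t.values.sum - t.getD k 0 + v := by
  by_cases hc : t.contains k = true
  · have hnd : (t.items.map Prod.fst).Nodup := by simpa [PySem.Dict.keys] using h
    have hany : t.items.any (fun p => p.1 == k) = true := by
      simpa [PySem.Dict.contains] using hc
    simp only [PySem.Dict.insert, hc, if_true, PySem.Dict.values, PySem.Dict.getD,
      PySem.Dict.get?]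
    exact pv_aux_replace t.items k v hnd hany
  · have hcf : t.contains k = false := by simpa using hc
    have hfind : t.items.find? (fun p => p.1 == k) = none := by
      rw [List.find?_eq_none]
      intro p hp hb
      have : t.items.any (fun p => p.1 == k) = true := List.any_eq_true.mpr ⟨p, hp, hb⟩
      simp [PySem.Dict.contains, this] at hcf
    simp [PySem.Dict.insert, hcf, PySem.Dict.values, PySem.Dict.getD, PySem.Dict.get?, hfind]

-- one (i, j) step: A's step is the weak step together with the bookkeeping identity
theorem pv_step (A : List Int) (i j : Int) (dic : List (PySem.Dict Int Int)) (res : Int)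
    (hj0 : 0 ≤ j) (hji : j < i) (hi : i < (dic.length : Int)) (hG : pvGood dic) :
    pvStepA A i (dic, res) j =
      (pvStepW A (PySem.List.pyGetD A i 0) i dic j,
       res + (PySem.List.pyGetD dic j PySem.Dict.empty).getD
               (PySem.List.pyGetD A i 0 - PySem.List.pyGetD A j 0) 0) ∧
    pvVSum (pvStepW A (PySem.List.pyGetD A i 0) i dic j) =
      pvVSum dic + (PySem.List.pyGetD dic j PySem.Dict.empty).getD
               (PySem.List.pyGetD A i 0 - PySem.List.pyGetD A j 0) 0 + 1 ∧
    pvGood (pvStepW A (PySem.List.pyGetD A i 0) i dic j) ∧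
    (pvStepW A (PySem.List.pyGetD A i 0) i dic j).length = dic.length := by
  have hi0 : (0:Int) ≤ i := le_trans hj0 (le_of_lt hji)
  have hjlen : j < (dic.length : Int) := lt_trans hji hi
  have hit : i.toNat < dic.length := by omega
  have hjt : j.toNat < dic.length := by omega
  have hne : j.toNat ≠ i.toNat := by omega
  set d := PySem.List.pyGetD A i 0 - PySem.List.pyGetD A j 0 with hd
  have hti : PySem.List.pyGetD dic i PySem.Dict.empty = dic[i.toNat] :=
    PySem.List.pyGetD_eq_getElem dic _ hi0 hi
  have htj : PySem.List.pyGetD dic j PySem.Dict.empty = dic[j.toNat] :=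
    PySem.List.pyGetD_eq_getElem dic _ hj0 hjlen
  set ti := dic[i.toNat] with hti'
  set tj := dic[j.toNat] with htj'
  set g := ti.getD d 0 with hg
  set k := tj.getD d 0 with hk
  have h1 : PySem.List.pySetD dic i ((PySem.List.pyGetD dic i PySem.Dict.empty).modify d 0 (· + 1))
      = dic.set i.toNat (ti.insert d (g + 1)) := by
    rw [pv_pySetD_eq_set dic i _ hi0 hi, hti]
    rfl
  have hlen1 : (dic.set i.toNat (ti.insert d (g + 1))).length = dic.length := by simp
  have hgj : PySem.List.pyGetD (dic.set i.toNat (ti.insert d (g + 1))) j PySem.Dict.empty = tj := by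
    rw [PySem.List.pyGetD_eq_getElem _ _ hj0 (by rw [hlen1]; exact hjlen)]
    rw [List.getElem_set_ne (by omega)]
  have hgi : PySem.List.pyGetD (dic.set i.toNat (ti.insert d (g + 1))) i PySem.Dict.empty
      = ti.insert d (g + 1) := by
    rw [PySem.List.pyGetD_eq_getElem _ _ hi0 (by rw [hlen1]; exact hi)]
    simp
  have hstepB : pvStepW A (PySem.List.pyGetD A i 0) i dic j
      = dic.set i.toNat (ti.insert d (g + k + 1)) := by
    show PySem.List.pySetD dic i _ = _
    rw [pv_pySetD_eq_set dic i _ hi0 hi, hti, htj]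
  have htiN : ti.keys.Nodup := hG ti (List.getElem_mem hit)
  have hvs : pvVSum (dic.set i.toNat (ti.insert d (g + k + 1))) = pvVSum dic + k + 1 := by
    show ((dic.set i.toNat _).map _).sum = _
    rw [pv_sum_map_set _ dic i.toNat _ hit]
    rw [pv_values_sum_insert ti d (g + k + 1) htiN]
    show pvVSum dic - ti.values.sum + (ti.values.sum - g + (g + k + 1)) = pvVSum dic + k + 1
    ring
  have hGood : pvGood (dic.set i.toNat (ti.insert d (g + k + 1))) := by
    intro t ht
    rcases List.mem_or_eq_of_mem_set ht with h | h
    · exact hG t h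
    · rw [h]; exact PySem.Dict.nodup_keys_insert _ _ _ htiN
  refine ⟨?_, by rw [hstepB, hvs, htj], by rw [hstepB]; exact hGood, by rw [hstepB]; simp⟩
  show (let dic' := PySem.List.pySetD dic i ((PySem.List.pyGetD dic i PySem.Dict.empty).modify d 0 (· + 1));
        let tjx := PySem.List.pyGetD dic' j PySem.Dict.empty;
        if tjx.contains d then
          (PySem.List.pySetD dic' i ((PySem.List.pyGetD dic' i PySem.Dict.empty).modify d 0 (· + tjx.getD d 0)),
           res + tjx.getD d 0)
        else (dic', res)) = _
  simp only [h1, hgj, hgi]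
  by_cases hc : tj.contains d = true
  · simp only [hc, if_true]
    have hgd : (ti.insert d (g + 1)).getD d 0 = g + 1 := PySem.Dict.getD_insert_self _ _ _ _
    show (PySem.List.pySetD (dic.set i.toNat (ti.insert d (g+1))) i
        ((ti.insert d (g+1)).insert d ((ti.insert d (g+1)).getD d 0 + k)), res + k) = _
    rw [pv_pySetD_eq_set _ i _ hi0 (by rw [hlen1]; exact hi), List.set_set, hgd,
      PySem.Dict.insert_insert_self]
    have he : g + 1 + k = g + k + 1 := by ring
    rw [he, hstepB, htj, ← hk]
  · have hcf : tj.contains d = false := by simpa using hc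
    simp only [hcf, Bool.false_eq_true, if_false]
    have hk0 : k = 0 := PySem.Dict.getD_of_not_contains tj 0 hcf
    rw [hstepB, htj, ← hk, hk0]
    norm_num

-- inner loop over any list of admissible j's
theorem pv_inner (A : List Int) (i : Int) :
    ∀ (L : List Int) (dic : List (PySem.Dict Int Int)) (res : Int),
    (∀ j ∈ L, 0 ≤ j ∧ j < i) → i < (dic.length : Int) → pvGood dic →
    L.foldl (pvStepA A i) (dic, res) =
      (L.foldl (pvStepW A (PySem.List.pyGetD A i 0) i) dic,
       res + (pvVSum (L.foldl (pvStepW A (PySem.List.pyGetD A i 0) i) dic) - pvVSum dic)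
           - L.length) ∧
    pvGood (L.foldl (pvStepW A (PySem.List.pyGetD A i 0) i) dic) ∧
    (L.foldl (pvStepW A (PySem.List.pyGetD A i 0) i) dic).length = dic.length := by
  intro L
  induction L with
  | nil => intro dic res _ _ hG; refine ⟨by simp, hG, rfl⟩
  | cons j T ih =>
    intro dic res hL hi hG
    obtain ⟨hj0, hji⟩ := hL j (by simp)
    obtain ⟨hstep, hvs, hG', hlen'⟩ := pv_step A i j dic res hj0 hji hi hG
    simp only [List.foldl_cons]
    rw [hstep]
    obtain ⟨h1, h2, h3⟩ := ih (pvStepW A (PySem.List.pyGetD A i 0) i dic j)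
      (res + (PySem.List.pyGetD dic j PySem.Dict.empty).getD
               (PySem.List.pyGetD A i 0 - PySem.List.pyGetD A j 0) 0)
      (fun j' hj' => hL j' (by simp [hj']))
      (by rw [hlen']; exact hi) hG'
    refine ⟨?_, h2, by rw [h3, hlen']⟩
    rw [h1, Prod.mk.injEq]
    refine ⟨rfl, ?_⟩
    rw [hvs]
    push_cast [List.length_cons]
    ring

-- outer loop over any list of admissible i's
theorem pv_outer (A : List Int) :
    ∀ (I : List Int) (dic : List (PySem.Dict Int Int)) (res : Int),
    (∀ i ∈ I, 1 ≤ i ∧ i < (dic.length : Int)) → pvGood dic →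
    I.foldl (fun st i => (PySem.List.pyRange 0 i 1).foldl (pvStepA A i) st) (dic, res) =
      (I.foldl (fun dp i => (PySem.List.pyRange 0 i 1).foldl
          (pvStepW A (PySem.List.pyGetD A i 0) i) dp) dic,
       res + (pvVSum (I.foldl (fun dp i => (PySem.List.pyRange 0 i 1).foldl
          (pvStepW A (PySem.List.pyGetD A i 0) i) dp) dic) - pvVSum dic)
           - ((I.map (fun i => i.toNat)).sum : Int)) ∧
    pvGood (I.foldl (fun dp i => (PySem.List.pyRange 0 i 1).foldl
          (pvStepW A (PySem.List.pyGetD A i 0) i) dp) dic) ∧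
    (I.foldl (fun dp i => (PySem.List.pyRange 0 i 1).foldl
          (pvStepW A (PySem.List.pyGetD A i 0) i) dp) dic).length = dic.length := by
  intro I
  induction I with
  | nil => intro dic res _ hG; refine ⟨by simp, hG, rfl⟩
  | cons i T ih =>
    intro dic res hI hG
    obtain ⟨hi1, hilen⟩ := hI i (by simp)
    obtain ⟨h1, h2, h3⟩ := pv_inner A i (PySem.List.pyRange 0 i 1) dic res
      (fun j hj => by
        have := (PySem.List.mem_pyRange_one).mp hj
        exact ⟨this.1, this.2⟩)
      hilen hG
    simp only [List.foldl_cons]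
    rw [h1]
    obtain ⟨g1, g2, g3⟩ := ih ((PySem.List.pyRange 0 i 1).foldl
        (pvStepW A (PySem.List.pyGetD A i 0) i) dic)
      (res + (pvVSum ((PySem.List.pyRange 0 i 1).foldl
          (pvStepW A (PySem.List.pyGetD A i 0) i) dic) - pvVSum dic)
          - ((PySem.List.pyRange 0 i 1).length : Int))
      (fun i' hi' => ⟨(hI i' (by simp [hi'])).1, by rw [h3]; exact (hI i' (by simp [hi'])).2⟩)
      h2
    refine ⟨?_, g2, by rw [g3, h3]⟩
    rw [g1, Prod.mk.injEq]
    refine ⟨rfl, ?_⟩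
    have hlr : ((PySem.List.pyRange 0 i 1).length : Int) = (i.toNat : Int) := by
      rw [PySem.List.length_pyRange_one]; omega
    rw [hlr]
    push_cast [List.map_cons, List.sum_cons]
    ring

-- Gauss: the number of (i, j) pairs the loops process
theorem pv_gauss : ∀ (m : Nat),
    2 * ((PySem.List.pyRange 1 (m : Int) 1).map (fun i => i.toNat)).sum = m * (m - 1) := by
  intro m
  induction m with
  | zero => simp [PySem.List.pyRange_one_eq_nil]
  | succ p ih =>
    cases Nat.eq_zero_or_pos p with
    | inl h0 =>
      subst h0
      rw [show (((0:Nat) + 1 : Nat) : Int) = 1 by norm_num, PySem.List.pyRange_one_eq_nil le_rfl]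
      simp
    | inr hp =>
      have : ((p + 1 : Nat) : Int) = (p : Int) + 1 := by push_cast; ring
      rw [this, PySem.List.pyRange_one_succ_right (by exact_mod_cast hp)]
      simp only [List.map_append, List.sum_append, List.map_cons, List.map_nil,
        List.sum_cons, List.sum_nil]
      have hto : (p : Int).toNat = p := by omega
      rw [Nat.mul_add, ih, hto]
      obtain ⟨r, rfl⟩ : ∃ r, p = r + 1 := ⟨p - 1, by omega⟩
      simp only [Nat.succ_sub_one]
      ring

-- ===== new lemmas for the pair-keyed B =====

theorem pv_foldl_add (f : Int → Int) :
    ∀ (l : List Int) (c : Int), l.foldl (fun t k => t + f k) c = c + (l.map f).sum := by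
  intro l
  induction l with
  | nil => intro c; simp
  | cons x t ih => intro c; simp only [List.foldl_cons, List.map_cons, List.sum_cons, ih]; ring

theorem pv_fold_pos : ∀ (L : List (Int × Int)) (d : PySem.Dict Int (List Int)) (v : Int),
    (L.foldl (fun d p => d.modify p.2 [] (fun l => l ++ [p.1])) d).getD v []
      = d.getD v [] ++ ((L.filter (fun p => p.2 == v)).map (fun p => p.1)) := by
  intro L
  induction L with
  | nil => intro d v; simp
  | cons p T ih =>
    intro d v
    simp only [List.foldl_cons, List.filter_cons]
    rw [ih]
    by_cases hv : p.2 = v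
    · have hb : (p.2 == v) = true := by simp [hv]
      rw [PySem.Dict.getD_modify]
      simp [hv]
    · have hb : (p.2 == v) = false := by simp [hv]
      rw [PySem.Dict.getD_modify]
      simp only [hb]
      simp [Ne.symm hv]


theorem pv_pos_getD (A : List Int) (v : Int) :
    (pvPosB A).getD v []
      = (PySem.List.pyRange 0 (A.length : Int) 1).filter
          (fun k => PySem.List.pyGetD A k 0 == v) := by
  show ((PySem.List.enumerate A 0).foldl
      (fun d p => d.modify p.2 [] (fun l => l ++ [p.1])) PySem.Dict.empty).getD v [] = _
  rw [pv_fold_pos, PySem.Dict.getD_empty, List.nil_append,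
    PySem.List.enumerate_eq_map_pyRange A (0:Int)]
  rw [List.filter_map, List.map_map]
  simp only [Function.comp_def]
  rw [show (fun x : Int => (((x, PySem.List.pyGetD A x 0) : Int × Int).1)) = id from rfl,
    List.map_id]
  rfl


theorem pv_takeWhile_filter (j : Int) : ∀ (l : List Int), l.Pairwise (· < ·) →
    l.takeWhile (fun k => decide (k < j)) = l.filter (fun k => decide (k < j)) := by
  intro l
  induction l with
  | nil => intro _; rfl
  | cons a t ih =>
    intro hp
    rw [List.pairwise_cons] at hp
    by_cases ha : a < j
    · have hb : decide (a < j) = true := decide_eq_true ha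
      rw [List.takeWhile_cons, List.filter_cons, hb, ih hp.2]
      simp
    · have hb : decide (a < j) = false := decide_eq_false ha
      have ht : List.filter (fun k => decide (k < j)) t = [] := by
        rw [List.filter_eq_nil_iff]
        intro x hx
        have := hp.1 x hx
        simp; omega
      rw [List.takeWhile_cons, List.filter_cons, hb, ht]
      simp


theorem pv_filter_lt_range (n j : Int) (h0 : 0 ≤ j) (h1 : j ≤ n) :
    (PySem.List.pyRange 0 n 1).filter (fun k => decide (k < j)) = PySem.List.pyRange 0 j 1 := by
  rw [PySem.List.pyRange_one_append 0 j n h0 h1, List.filter_append]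
  have h2 : (PySem.List.pyRange 0 j 1).filter (fun k => decide (k < j))
      = PySem.List.pyRange 0 j 1 := by
    rw [List.filter_eq_self]
    intro x hx
    have := (PySem.List.mem_pyRange_one).mp hx
    simp; omega
  have h3 : (PySem.List.pyRange j n 1).filter (fun k => decide (k < j)) = [] := by
    rw [List.filter_eq_nil_iff]
    intro x hx
    have := (PySem.List.mem_pyRange_one).mp hx
    simp; omega
  rw [h2, h3, List.append_nil]


theorem pv_pos_take (A : List Int) (j v : Int) (h0 : 0 ≤ j) (h1 : j ≤ (A.length : Int)) :
    ((pvPosB A).getD v []).takeWhile (fun k => decide (k < j))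
      = (PySem.List.pyRange 0 j 1).filter (fun k => PySem.List.pyGetD A k 0 == v) := by
  rw [pv_pos_getD]
  rw [pv_takeWhile_filter j _
    (List.Pairwise.sublist List.filter_sublist (PySem.List.pairwise_lt_pyRange_one 0 (A.length : Int)))]
  rw [List.filter_comm, pv_filter_lt_range _ j h0 h1]


theorem pv_rowP_congr (A : List Int) (W W' : PySem.Dict (Int × Int) Int) (j m v : Int)
    (h : ∀ k : Int, 0 ≤ k → k < j → W'.getD (k, m) 0 = W.getD (k, m) 0) :
    pvRowP A W' j m v = pvRowP A W j m v := by
  unfold pvRowP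
  congr 1
  apply List.map_congr_left
  intro k hk
  have hk2 := (PySem.List.mem_pyRange_one).mp (List.mem_of_mem_filter hk)
  exact h k hk2.1 hk2.2


theorem pv_values_sum_insert_fresh (d : PySem.Dict (Int × Int) Int) (k : Int × Int) (v : Int)
    (h : d.contains k = false) : (d.insert k v).values.sum = d.values.sum + v := by
  rw [PySem.Dict.values, PySem.Dict.items_insert, if_neg (by simp [h])]
  simp [PySem.Dict.values]


theorem pv_weak_succ (A : List Int) (m : Int) (h : 0 ≤ m) :
    pvWeakAt A (m + 1) = pvWeakIn A m m := by
  rcases eq_or_lt_of_le h with h1 | h1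
  · show (PySem.List.pyRange 1 (m+1) 1).foldl _ _ = (PySem.List.pyRange 0 m 1).foldl _ _
    rw [← h1]
    rw [PySem.List.pyRange_one_eq_nil (by norm_num), PySem.List.pyRange_one_eq_nil (by norm_num)]
    rfl
  · show (PySem.List.pyRange 1 (m+1) 1).foldl _ _ = _
    rw [PySem.List.pyRange_one_succ_right (by omega : (1:Int) ≤ m), List.foldl_append]
    rfl


theorem pv_alt_succ (A : List Int) (m : Int) (h : 0 ≤ m) :
    pvAltAt A (m + 1) = pvAltIn A m m := by
  rcases eq_or_lt_of_le h with h1 | h1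
  · show (PySem.List.pyRange 1 (m+1) 1).foldl _ _ = (PySem.List.pyRange 0 m 1).foldl _ _
    rw [← h1]
    rw [PySem.List.pyRange_one_eq_nil (by norm_num), PySem.List.pyRange_one_eq_nil (by norm_num)]
    rfl
  · show (PySem.List.pyRange 1 (m+1) 1).foldl _ _ = _
    rw [PySem.List.pyRange_one_succ_right (by omega : (1:Int) ≤ m), List.foldl_append]
    rfl


theorem pv_inner_step (A : List Int) (m j : Int)
    (hO : pvInv A m (pvWeakAt A m) (pvAltAt A m).1 (pvAltAt A m).2)
    (h0 : 0 ≤ j) (hjm : j < m) (hmn : m < (A.length : Int))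
    (dp : List (PySem.Dict Int Int)) (W S : PySem.Dict (Int × Int) Int)
    (hI : pvInvIn A m j dp W S) :
    pvInvIn A m (j + 1) (pvStepW A (PySem.List.pyGetD A m 0) m dp j)
      (pvStepB A (pvPosB A) (PySem.List.pyGetD A m 0) m (W, S) j).1
      (pvStepB A (pvPosB A) (PySem.List.pyGetD A m 0) m (W, S) j).2 := by
  obtain ⟨hI1, hI2, hI3, hI4, hI5, hI6, hI7, hI8⟩ := hI
  obtain ⟨hO1, hO2, hO3, hO4, hO5, hO6⟩ := hO
  have hm0 : (0:Int) ≤ m := le_trans h0 (le_of_lt hjm)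
  have hjn : j < (A.length : Int) := lt_trans hjm hmn
  have hjm' : j ≠ m := by omega
  set ai := PySem.List.pyGetD A m 0 with hai
  set aj := PySem.List.pyGetD A j 0 with haj
  set d := ai - aj with hd
  set v := 2 * aj - ai with hv
  have hvd : aj - d = v := by rw [hd, hv]; ring
  set W0 := (pvAltAt A m).1 with hW0
  set r := pvRowV A W j v with hr
  -- the row at j of the current weak table is r
  have hdpj : (PySem.List.pyGetD dp j PySem.Dict.empty).getD d 0 = r := by
    rw [hI3 j h0 hjn hjm']
    have h4 := (hO4 j h0 hjn).2 hjm d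
    rw [h4, hvd, hr]
    exact (pv_rowP_congr A W0 W j j v
      (fun k _ _ => hI5 (k, j) (by simpa using hjm'))).symm
  -- weak step in closed form
  have hmlt : m < (dp.length : Int) := by rw [hI1]; exact hmn
  have hmt : m.toNat < dp.length := by omega
  have hti : PySem.List.pyGetD dp m PySem.Dict.empty = dp[m.toNat] :=
    PySem.List.pyGetD_eq_getElem dp _ hm0 hmlt
  set ti := dp[m.toNat] with hti'
  have hstepW : pvStepW A ai m dp j
      = dp.set m.toNat (ti.insert d (ti.getD d 0 + r + 1)) := by
    simp only [pvStepW, ← haj, ← hd]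
    rw [hdpj, pv_pySetD_eq_set dp m _ hm0 hmlt, hti]
  -- (j, m) is not yet a key of W
  have hWf : W.contains (j, m) = false := by
    by_contra hcc
    have hcc' : W.contains (j, m) = true := by
      cases hx : W.contains (j, m)
      · exact absurd hx hcc
      · rfl
    rcases hI4 (j, m) hcc' with ⟨_, _, h3 | h3⟩
    · exact absurd h3 (by omega)
    · exact absurd h3.2 (by omega)
  -- B step in closed form
  have hstepB : pvStepB A (pvPosB A) ai m (W, S) j
      = (W.insert (j, m) (r + 1),
         if S.contains (j, v) = true then S else S.insert (j, v) r) := by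
    by_cases hc : S.contains (j, v) = true
    · have hSr : S.getD (j, v) 0 = r := by
        have := (hI6 (j, v) hc).2.2
        rw [hr]; exact this
      simp only [pvStepB, ← haj, ← hv, hc, if_true]
      rw [hSr]
    · have hcf : S.contains (j, v) = false := by simpa using hc
      have ht : (((pvPosB A).getD v []).takeWhile (fun k => decide (k < j))).foldl
          (fun t k => t + W.getD (k, j) 0) 0 = r := by
        rw [pv_pos_take A j v h0 (le_of_lt hjn), pv_foldl_add]
        rw [hr]
        show 0 + pvRowP A W j j v = pvRowV A W j v
        rw [pvRowV]; ring
      simp only [pvStepB, ← haj, ← hv, hcf, Bool.false_eq_true, if_false]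
      rw [ht]
  set W' := W.insert (j, m) (r + 1) with hW'
  -- lookups of keys other than (j, m) are unchanged
  have hWget : ∀ p : Int × Int, p ≠ (j, m) → W'.getD p 0 = W.getD p 0 := by
    intro p hp
    exact PySem.Dict.getD_insert_of_ne W _ _ hp
  have hWrow : ∀ (j0 vv : Int), j0 ≠ m → pvRowV A W' j0 vv = pvRowV A W j0 vv := by
    intro j0 vv hne
    exact pv_rowP_congr A W W' j0 j0 vv
      (fun k _ _ => hWget (k, j0) (by intro he; exact hne (congrArg Prod.snd he)))
  -- the row of the new table, against the new W
  have hsplit : PySem.List.pyRange 0 (j+1) 1 = PySem.List.pyRange 0 j 1 ++ [j] :=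
    PySem.List.pyRange_one_succ_right h0
  have hsnoc : ∀ vv : Int, pvRowP A W' (j+1) m vv
      = pvRowP A W j m vv + (if aj = vv then (r + 1) else 0) := by
    intro vv
    have hfirst : pvRowP A W' j m vv = pvRowP A W j m vv :=
      pv_rowP_congr A W W' j m vv
        (fun k _ hkj => hWget (k, m)
          (by intro he; have := congrArg Prod.fst he; simp at this; omega))
    simp only [pvRowP, hsplit, List.filter_append, List.map_append, List.sum_append]
    by_cases hvv : aj = vv
    · have hb : (aj == vv) = true := by simp [hvv]
      have hone : List.filter (fun k => PySem.List.pyGetD A k 0 == vv) [j] = [j] := by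
        simp [List.filter, ← haj, hb]
      rw [hone]
      simp only [List.map_cons, List.map_nil, List.sum_cons, List.sum_nil, if_pos hvv]
      have hself : W'.getD (j, m) 0 = r + 1 := by
        rw [hW']; exact PySem.Dict.getD_insert_self _ _ _ _
      rw [hself]
      have hf := hfirst
      simp only [pvRowP] at hf
      rw [hf]
      ring
    · have hb : (aj == vv) = false := by simp [hvv]
      have hnone : List.filter (fun k => PySem.List.pyGetD A k 0 == vv) [j] = [] := by
        simp [List.filter, ← haj, hb]
      rw [hnone]
      simp only [List.map_nil, List.sum_nil, if_neg hvv]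
      have hf := hfirst
      simp only [pvRowP] at hf
      rw [hf]
  -- vsum of the new weak table
  have htiN : ti.keys.Nodup := hI2 ti (List.getElem_mem hmt)
  have hvsW : pvVSum (dp.set m.toNat (ti.insert d (ti.getD d 0 + r + 1)))
      = pvVSum dp + (r + 1) := by
    show ((dp.set m.toNat _).map _).sum = _
    rw [pv_sum_map_set _ dp m.toNat _ hmt, pv_values_sum_insert ti d _ htiN]
    show pvVSum dp - ti.values.sum + (ti.values.sum - ti.getD d 0 + (ti.getD d 0 + r + 1)) = _
    ring
  have hvsB : W'.values.sum = W.values.sum + (r + 1) :=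
    pv_values_sum_insert_fresh W (j, m) (r + 1) hWf
  -- assemble
  rw [hstepW, hstepB]
  refine ⟨by simp [hI1], ?_, ?_, ?_, ?_, ?_, ?_, ?_⟩
  · intro t ht
    rcases List.mem_or_eq_of_mem_set ht with hh | hh
    · exact hI2 t hh
    · rw [hh]; exact PySem.Dict.nodup_keys_insert _ _ _ htiN
  · intro i0 hi00 hi0n hi0m
    have hi0lt : i0 < ((dp.set m.toNat (ti.insert d (ti.getD d 0 + r + 1))).length : Int) := by
      simp only [List.length_set, hI1]; exact hi0n
    rw [PySem.List.pyGetD_eq_getElem _ _ hi00 hi0lt,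
      List.getElem_set_ne (by omega),
      ← PySem.List.pyGetD_eq_getElem dp _ hi00 (by rw [hI1]; exact hi0n)]
    exact hI3 i0 hi00 hi0n hi0m
  · intro p hp
    rw [PySem.Dict.contains_insert] at hp
    rcases Bool.or_eq_true_iff.mp hp with hh | hh
    · have hpe : p = (j, m) := eq_of_beq hh
      subst hpe
      exact ⟨h0, hjm, Or.inr ⟨rfl, by omega⟩⟩
    · rcases hI4 p hh with ⟨g1, g2, g3 | g3⟩
      · exact ⟨g1, g2, Or.inl g3⟩
      · exact ⟨g1, g2, Or.inr ⟨g3.1, by omega⟩⟩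
  · intro p hp
    rw [hWget p (by intro he; rw [he] at hp; exact hp rfl)]
    exact hI5 p hp
  · intro q hq
    by_cases hc : S.contains (j, v) = true
    · simp only [hc, if_true] at hq ⊢
      rcases hI6 q hq with ⟨g1, g2, g3⟩
      exact ⟨g1, g2, by rw [g3]; exact (hWrow q.1 q.2 (by omega)).symm⟩
    · have hcf : S.contains (j, v) = false := by simpa using hc
      simp only [hcf, Bool.false_eq_true, if_false] at hq ⊢
      rw [PySem.Dict.contains_insert] at hq
      rcases Bool.or_eq_true_iff.mp hq with hh | hh
      · have hqe : q = (j, v) := eq_of_beq hh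
        subst hqe
        refine ⟨h0, hjm, ?_⟩
        rw [PySem.Dict.getD_insert_self]
        rw [hr]
        exact (hWrow j v (by omega)).symm
      · rcases hI6 q hh with ⟨g1, g2, g3⟩
        have hqne : q ≠ (j, v) := by
          intro he; rw [he] at hh; rw [hh] at hcf; exact absurd hcf (by simp)
        refine ⟨g1, g2, ?_⟩
        rw [PySem.Dict.getD_insert_of_ne S _ _ hqne, g3]
        exact (hWrow q.1 q.2 (by omega)).symm
  · intro d0
    have hmlt' : m < ((dp.set m.toNat (ti.insert d (ti.getD d 0 + r + 1))).length : Int) := by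
      simp only [List.length_set, hI1]; exact hmn
    have hgete : PySem.List.pyGetD (dp.set m.toNat (ti.insert d (ti.getD d 0 + r + 1))) m
        PySem.Dict.empty = ti.insert d (ti.getD d 0 + r + 1) := by
      rw [PySem.List.pyGetD_eq_getElem _ _ hm0 hmlt']
      simp
    rw [hgete, hsnoc (ai - d0)]
    have hI7' : ti.getD d0 0 = pvRowP A W j m (ai - d0) := by
      rw [← hti]; exact hI7 d0
    rw [← hI7', PySem.Dict.getD_insert]
    by_cases hdd : d0 = d
    · rw [if_pos hdd, if_pos (by rw [hdd, hd]; ring), hdd]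
      ring
    · rw [if_neg hdd, if_neg (by intro hcon; apply hdd; rw [hd]; omega)]
      ring
  · rw [hvsW, hvsB, hI8]

theorem pv_inner_fold (A : List Int) (m : Int)
    (hO : pvInv A m (pvWeakAt A m) (pvAltAt A m).1 (pvAltAt A m).2)
    (hmn : m < (A.length : Int)) (hm0 : 0 ≤ m) :
    ∀ jn : Nat, (jn : Int) ≤ m →
      pvInvIn A m jn (pvWeakIn A m jn) (pvAltIn A m jn).1 (pvAltIn A m jn).2 := by
  intro jn
  induction jn with
  | zero =>
    intro _
    have hw : pvWeakIn A m ((0:Nat):Int) = pvWeakAt A m := by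
      rw [pvWeakIn, Nat.cast_zero, PySem.List.pyRange_one_eq_nil le_rfl]
      rfl
    have ha : pvAltIn A m ((0:Nat):Int) = pvAltAt A m := by
      rw [pvAltIn, Nat.cast_zero, PySem.List.pyRange_one_eq_nil le_rfl]
      rfl
    rw [hw, ha, Nat.cast_zero]
    obtain ⟨hO1, hO2, hO3, hO4, hO5, hO6⟩ := hO
    refine ⟨hO1, hO2, fun _ _ _ _ => rfl, ?_, fun _ _ => rfl, hO5, ?_, hO6⟩
    · intro p hp
      rcases hO3 p hp with ⟨g1, g2, g3⟩
      exact ⟨g1, g2, Or.inl g3⟩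
    · intro d
      rw [(hO4 m hm0 hmn).1 le_rfl, PySem.Dict.getD_empty, pvRowP,
        PySem.List.pyRange_one_eq_nil le_rfl]
      rfl
  | succ p ih =>
    intro hle
    have hple : ((p:Nat):Int) ≤ m := by push_cast at hle ⊢; omega
    have hplt : ((p:Nat):Int) < m := by push_cast at hle; omega
    have hcast : ((p+1:Nat):Int) = ((p:Nat):Int) + 1 := by push_cast; ring
    have hw : pvWeakIn A m ((p+1:Nat):Int)
        = pvStepW A (PySem.List.pyGetD A m 0) m (pvWeakIn A m ((p:Nat):Int)) ((p:Nat):Int) := by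
      rw [pvWeakIn, pvWeakIn, hcast,
        PySem.List.pyRange_one_succ_right (Int.natCast_nonneg p), List.foldl_append,
        List.foldl_cons, List.foldl_nil]
    have ha : pvAltIn A m ((p+1:Nat):Int)
        = pvStepB A (pvPosB A) (PySem.List.pyGetD A m 0) m (pvAltIn A m ((p:Nat):Int)) ((p:Nat):Int) := by
      rw [pvAltIn, pvAltIn, hcast,
        PySem.List.pyRange_one_succ_right (Int.natCast_nonneg p), List.foldl_append,
        List.foldl_cons, List.foldl_nil]
    have hstep := pv_inner_step A m ((p:Nat):Int) hO (Int.natCast_nonneg p) hplt hmn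
      (pvWeakIn A m ((p:Nat):Int)) (pvAltIn A m ((p:Nat):Int)).1 (pvAltIn A m ((p:Nat):Int)).2
      (ih hple)
    rw [hw, ha, hcast]
    simpa using hstep

theorem pv_outer_inv (A : List Int) :
    ∀ mn : Nat, (mn : Int) ≤ (A.length : Int) →
      pvInv A mn (pvWeakAt A mn) (pvAltAt A mn).1 (pvAltAt A mn).2 := by
  intro mn
  induction mn with
  | zero =>
    intro _
    have hw : pvWeakAt A ((0:Nat):Int) = pvDp0 A := by
      rw [pvWeakAt, Nat.cast_zero, PySem.List.pyRange_one_eq_nil (by norm_num)]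
      rfl
    have ha : pvAltAt A ((0:Nat):Int) = (PySem.Dict.empty, PySem.Dict.empty) := by
      rw [pvAltAt, Nat.cast_zero, PySem.List.pyRange_one_eq_nil (by norm_num)]
      rfl
    rw [hw, ha, Nat.cast_zero]
    refine ⟨?_, ?_, ?_, ?_, ?_, ?_⟩
    · rw [pvDp0, List.length_map, PySem.List.length_pyRange_one]; omega
    · intro t ht
      rcases List.mem_map.mp ht with ⟨_, _, rfl⟩
      simp [PySem.Dict.keys_empty]
    · intro q hq
      rw [PySem.Dict.contains_empty] at hq
      cases hq
    · intro j hj0 hjn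
      refine ⟨fun _ => ?_, fun hlt => absurd hlt (not_lt.mpr hj0)⟩
      rw [pvDp0, PySem.List.pyGetD_map_pyRange_of_nonneg _ _ _ _ hj0 hjn]
    · intro q hq
      rw [PySem.Dict.contains_empty] at hq
      cases hq
    · have hvs0 : pvVSum (pvDp0 A) = 0 := by
        rw [pvVSum, pvDp0, List.map_map]
        have hcc : ((fun t : PySem.Dict Int Int => t.values.sum) ∘ fun _ => PySem.Dict.empty)
            = fun _ : Int => (0 : Int) := by
          funext x
          show (PySem.Dict.empty (κ := Int) (ν := Int)).values.sum = 0
          simp [PySem.Dict.values, PySem.Dict.empty]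
        rw [hcc]
        simp
      rw [hvs0]
      show (0:Int) = (PySem.Dict.empty (κ := Int × Int) (ν := Int)).values.sum
      simp [PySem.Dict.values, PySem.Dict.empty]
  | succ p ih =>
    intro hle
    have hp1 : ((p+1:Nat):Int) = ((p:Nat):Int) + 1 := by push_cast; ring
    have hple : ((p:Nat):Int) ≤ (A.length : Int) := by push_cast at hle ⊢; omega
    have hplt : ((p:Nat):Int) < (A.length : Int) := by push_cast at hle; omega
    have hO := ih hple
    have hin := pv_inner_fold A ((p:Nat):Int) hO hplt (Int.natCast_nonneg p) p le_rfl
    have hw : pvWeakAt A ((p+1:Nat):Int) = pvWeakIn A ((p:Nat):Int) ((p:Nat):Int) := by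
      rw [hp1]
      exact pv_weak_succ A _ (Int.natCast_nonneg p)
    have ha : pvAltAt A ((p+1:Nat):Int) = pvAltIn A ((p:Nat):Int) ((p:Nat):Int) := by
      rw [hp1]
      exact pv_alt_succ A _ (Int.natCast_nonneg p)
    rw [hw, ha, hp1]
    obtain ⟨hI1, hI2, hI3, hI4, hI5, hI6, hI7, hI8⟩ := hin
    obtain ⟨hO1, hO2, hO3, hO4, hO5, hO6⟩ := hO
    refine ⟨hI1, hI2, ?_, ?_, ?_, hI8⟩
    · intro q hq
      rcases hI4 q hq with ⟨g1, g2, g3 | g3⟩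
      · exact ⟨g1, g2, by omega⟩
      · exact ⟨g1, g2, by omega⟩
    · intro j hj0 hjn
      constructor
      · intro hge
        rw [hI3 j hj0 hjn (by omega)]
        exact (hO4 j hj0 hjn).1 (by omega)
      · intro hlt d
        by_cases hjp : j = ((p:Nat):Int)
        · subst hjp
          exact hI7 d
        · have hjlt : j < ((p:Nat):Int) := by omega
          rw [hI3 j hj0 hjn (by omega), (hO4 j hj0 hjn).2 hjlt d]
          exact (pv_rowP_congr A (pvAltAt A ((p:Nat):Int)).1
            (pvAltIn A ((p:Nat):Int) ((p:Nat):Int)).1 j j (PySem.List.pyGetD A j 0 - d)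
            (fun k _ _ => hI5 (k, j) (by omega))).symm
    · intro q hq
      rcases hI6 q hq with ⟨g1, g2, g3⟩
      exact ⟨g1, by omega, g3⟩

theorem pv_A_eq (A : List Int) :
    numberOfArithmeticSlices A
      = pvVSum (pvWeakAt A (A.length : Int))
        - PySem.Int.floordiv ((A.length : Int) * ((A.length : Int) - 1)) 2 := by
  simp only [numberOfArithmeticSlices]
  have hdp0 : ((PySem.List.pyRange 0 (A.length : Int) 1).map
      (fun _ => PySem.Dict.empty (κ := Int) (ν := Int))) = pvDp0 A := rfl
  have hlen0 : ((pvDp0 A).length : Int) = (A.length : Int) := by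
    rw [pvDp0, List.length_map, PySem.List.length_pyRange_one]; omega
  have hG0 : pvGood (pvDp0 A) := by
    intro t ht
    rcases List.mem_map.mp ht with ⟨_, _, rfl⟩
    simp [PySem.Dict.keys_empty]
  have hvs0 : pvVSum (pvDp0 A) = 0 := by
    rw [pvVSum, pvDp0, List.map_map]
    have hcc : ((fun t : PySem.Dict Int Int => t.values.sum) ∘ fun _ => PySem.Dict.empty)
        = fun _ : Int => (0 : Int) := by
      funext x
      show (PySem.Dict.empty (κ := Int) (ν := Int)).values.sum = 0
      simp [PySem.Dict.values, PySem.Dict.empty]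
    rw [hcc]
    simp
  obtain ⟨h1, _, _⟩ := pv_outer A (PySem.List.pyRange 1 (A.length : Int) 1) (pvDp0 A) 0
    (fun i hi => by
      have := (PySem.List.mem_pyRange_one).mp hi
      exact ⟨this.1, by rw [hlen0]; exact this.2⟩)
    hG0
  rw [hdp0, h1, hvs0]
  have hcast : (A.length : Int) * ((A.length : Int) - 1) = ((A.length * (A.length - 1) : Nat) : Int) := by
    cases hA : A.length with
    | zero => simp
    | succ r => push_cast [Nat.succ_sub_one]; ring
  have hfd : PySem.Int.floordiv ((A.length : Int) * ((A.length : Int) - 1)) 2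
      = (((PySem.List.pyRange 1 (A.length : Int) 1).map (fun i => i.toNat)).sum : Int) := by
    rw [hcast, ← pv_gauss A.length]
    have h2 : ((PySem.List.pyRange 1 (A.length : Int) 1).map (fun i => i.toNat)).sum * 2 / 2
        = ((PySem.List.pyRange 1 (A.length : Int) 1).map (fun i => i.toNat)).sum :=
      Nat.mul_div_cancel _ (by norm_num)
    have hnc := PySem.Int.floordiv_natCast
      (2 * ((PySem.List.pyRange 1 (A.length : Int) 1).map (fun i => i.toNat)).sum) 2
    rw [show ((2:Nat):Int) = (2:Int) by norm_num] at hnc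
    rw [hnc, Nat.mul_comm, h2, Nat.cast_list_sum, List.map_map]
    rfl
  rw [hfd]
  show 0 + (pvVSum (pvWeakAt A (A.length : Int)) - 0) - _
      = pvVSum (pvWeakAt A (A.length : Int)) - _
  ring

-- ===== VERDICT (by name: the statement is the Claim_ definition above) =====
theorem numberOfArithmeticSlices_spec : Claim_equal_numberOfArithmeticSlices := by
  intro A _
  show numberOfArithmeticSlices A = numberOfArithmeticSlices_alt A
  have hfin := (pv_outer_inv A A.length le_rfl).2.2.2.2.2
  rw [pv_A_eq A]
  show _ = (pvAltAt A (A.length : Int)).1.values.sum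
      - PySem.Int.floordiv ((A.length : Int) * ((A.length : Int) - 1)) 2
  rw [hfin]
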